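-- pv_equiv track=rewrite | github.com/KAMO333/ProblemSolvingQA | python/Python Problems/codewares/crap.py | crap
-- ===== SOURCE A (Python) =====
-- def crap(garden: list[list[str]], bags: int, cap: int) -> str:
--     number_of_crap = 0
--     total_space = bags * cap
--
--     for garden_space in garden:
--         for garden_pick in garden_space:
--             if garden_pick == "D":
--                 return "Dog!!"
--
--             if garden_pick == "@":
--                 number_of_crap += 1
--
--     if number_of_crap <= total_space:
--         return "Clean"
--     else:
--         return "Cr@p"
-- ===== SOURCE B (Python) =====
-- def crap(garden: list[list[str]], bags: int, cap: int) -> str: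
--     if any(cell == "D" for row in garden for cell in row):
--         return "Dog!!"
--     n = sum(cell == "@" for row in garden for cell in row)
--     return "Clean" if n <= bags * cap else "Cr@p"
-- ===== Notes on version B (the rewrite author's own statement) =====
-- stated objective: simpler
-- what changed: Replaces A's single combined early-return counting loop with two separate whole-grid passes over the flattened garden: one 'any' scan for a dog, then one count of '@', followed by the capacity comparison.
import Mathlib
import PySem

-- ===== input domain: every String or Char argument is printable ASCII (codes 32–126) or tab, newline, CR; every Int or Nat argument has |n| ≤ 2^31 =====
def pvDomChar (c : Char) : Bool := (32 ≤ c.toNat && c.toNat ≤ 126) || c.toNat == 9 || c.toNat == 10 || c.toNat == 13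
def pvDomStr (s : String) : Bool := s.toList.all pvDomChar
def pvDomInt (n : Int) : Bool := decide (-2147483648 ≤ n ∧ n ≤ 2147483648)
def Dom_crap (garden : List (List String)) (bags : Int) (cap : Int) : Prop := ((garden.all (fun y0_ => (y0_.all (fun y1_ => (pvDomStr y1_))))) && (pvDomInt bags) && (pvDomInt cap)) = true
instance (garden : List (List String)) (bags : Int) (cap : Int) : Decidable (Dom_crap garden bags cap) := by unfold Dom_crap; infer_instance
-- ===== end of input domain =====

-- B replaces A's single early-return counting loop with a dog-scan pass then a count pass (objective: simpler).

-- ===== PORT A =====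
-- inner loop of A over one row: returns none when a "D" is hit (early return "Dog!!"), else the updated count
def crapRowA (row : List String) (cnt : Int) : Option Int :=
  match row with
  | [] => some cnt
  | c :: rest =>
    if c = "D" then none
    else crapRowA rest (if c = "@" then cnt + 1 else cnt)

-- outer loop of A over the rows
def crapRowsA (rows : List (List String)) (cnt : Int) : Option Int :=
  match rows with
  | [] => some cnt
  | r :: rest =>
    match crapRowA r cnt with
    | none => none
    | some cnt' => crapRowsA rest cnt'

def crap (garden : List (List String)) (bags : Int) (cap : Int) : String :=
  match crapRowsA garden 0 with
  | none => "Dog!!"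
  | some n => if n ≤ bags * cap then "Clean" else "Cr@p"

-- ===== PORT B =====
def crap_alt (garden : List (List String)) (bags : Int) (cap : Int) : String :=
  if (garden.flatMap id).any (fun c => c == "D") then "Dog!!"
  else if ((garden.flatMap id).countP (fun c => c == "@") : Int) ≤ bags * cap then "Clean"
  else "Cr@p"

-- ===== PRECONDITION & SPEC =====
def Spec_crap (garden : List (List String)) (bags : Int) (cap : Int) (out : String) : Prop := out = crap_alt garden bags cap
instance (garden : List (List String)) (bags : Int) (cap : Int) (out : String) : Decidable (Spec_crap garden bags cap out) := by unfold Spec_crap; infer_instance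

-- ===== CLAIM (what is proved, stated in full; the proofs are below) =====
def Claim_equal_crap : Prop := ∀ (garden : List (List String)) (bags : Int) (cap : Int), Dom_crap garden bags cap → Spec_crap garden bags cap (crap garden bags cap)

-- ===== LEMMAS AND PROOFS =====

-- A's row loop characterised: none iff the row contains "D", else count added
theorem crapRowA_eq (row : List String) (cnt : Int) :
    crapRowA row cnt =
      if row.any (fun c => c == "D") then none
      else some (cnt + (row.countP (fun c => c == "@") : Int)) := by
  induction row generalizing cnt with
  | nil => simp [crapRowA]
  | cons c rest ih =>
    by_cases hD : c = "D"
    · simp [crapRowA, hD]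
    · by_cases hA : c = "@" <;>
        simp [crapRowA, hD, hA, ih, List.countP_cons] <;>
        split <;> simp <;> ring

theorem crapRowsA_eq (rows : List (List String)) (cnt : Int) :
    crapRowsA rows cnt =
      if (rows.flatMap id).any (fun c => c == "D") then none
      else some (cnt + ((rows.flatMap id).countP (fun c => c == "@") : Int)) := by
  induction rows generalizing cnt with
  | nil => simp [crapRowsA]
  | cons r rest ih =>
    simp only [crapRowsA, crapRowA_eq, List.flatMap_cons, List.any_append, id]
    by_cases h : r.any (fun c => c == "D")
    · simp [h]
    · simp [h, ih, List.countP_append]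
      split <;> simp <;> push_cast <;> ring

-- ===== VERDICT (by name: the statement is the Claim_ definition above) =====
theorem crap_spec : Claim_equal_crap := by
  intro garden bags cap _
  show crap garden bags cap = crap_alt garden bags cap
  unfold crap crap_alt
  rw [crapRowsA_eq]
  by_cases h : (garden.flatMap id).any (fun c => c == "D") <;>
    simp only [h, if_true, if_false, Bool.false_eq_true, zero_add]
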